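-- pv_equiv track=rewrite | github.com/LuckySaiSathvik/GYMS16_Pipelined_RISCV_based_Processor_Project | 2_gyms16_assembler.py | first_pass
-- ===== SOURCE A (Python) =====
-- def first_pass(assembly_code):
-- 	label_table = {}
-- 	address = 0
-- 	for line in assembly_code:
-- 		line = line.strip()
-- 		if not line or line.startswith(';'):
-- 			continue
-- 		if ':' in line:
-- 			label, instruction = line.split(':', 1)
-- 			label = label.strip()
-- 			label_table[label] = address
-- 			line = instruction.strip()
-- 		if line:
-- 			address += 1
-- 	return label_table
-- ===== SOURCE B (Python) =====
-- def first_pass(assembly_code):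
--     relevant = [ln for ln in (raw.strip() for raw in assembly_code)
--                 if ln and not ln.startswith(';')]
--
--     def is_instruction(ln):
--         if ':' in ln:
--             return bool(ln.split(':', 1)[1].strip())
--         return True
--
--     return {ln.split(':', 1)[0].strip():
--                 sum(1 for prev in relevant[:i] if is_instruction(prev))
--             for i, ln in enumerate(relevant) if ':' in ln}
-- ===== Notes on version B (the rewrite author's own statement) =====
-- stated objective: alternative
-- what changed: B replaces A's single stateful loop (dict + running address counter) by staged passes: first filter/strip the relevant lines, then build the table by a dict comprehension over enumerate(relevant), computing each label's address as the count of instruction-bearing lines in the prefix before it.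
import Mathlib
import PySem

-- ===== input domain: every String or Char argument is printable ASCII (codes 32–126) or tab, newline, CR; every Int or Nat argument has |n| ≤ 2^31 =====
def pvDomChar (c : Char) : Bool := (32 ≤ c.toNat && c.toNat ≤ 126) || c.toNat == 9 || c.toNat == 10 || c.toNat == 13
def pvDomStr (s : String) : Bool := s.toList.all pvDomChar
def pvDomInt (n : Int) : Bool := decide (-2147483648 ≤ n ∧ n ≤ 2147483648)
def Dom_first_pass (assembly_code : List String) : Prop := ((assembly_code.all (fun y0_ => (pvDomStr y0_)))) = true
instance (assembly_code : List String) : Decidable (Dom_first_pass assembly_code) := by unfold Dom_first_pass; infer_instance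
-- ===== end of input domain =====

-- B replaces A's single stateful loop (dict + running address counter) by staged passes:
-- filter/strip the relevant lines once, then build the table over enumerate(relevant), each
-- label's address being the count of instruction-bearing lines in the prefix before it.

-- ===== PORT A =====
-- A's loop body: strip, skip empty/comment, split off a label at the first ':' and record it
-- at the current address immediately, then 'if line: address += 1'.
def fpA_step (st : PySem.Dict String Int × Int) (line : String) : PySem.Dict String Int × Int :=
  let line := PySem.Str.strip line
  if line = "" ∨ PySem.Str.startswith line ";" then st
  else if PySem.Str.isIn ":" line then
    match PySem.Str.splitMax? line ":" 1 with
    | some (label :: instruction :: _) =>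
        let tbl := st.1.insert (PySem.Str.strip label) st.2
        let line := PySem.Str.strip instruction
        if line = "" then (tbl, st.2) else (tbl, st.2 + 1)
    | _ => if line = "" then st else (st.1, st.2 + 1)   -- unreachable totality guard: split(':',1) with ':' present yields two parts
  else if line = "" then st else (st.1, st.2 + 1)

def first_pass (assembly_code : List String) : List (String × Int) :=
  (assembly_code.foldl fpA_step (PySem.Dict.empty, 0)).1.items

-- ===== PORT B =====
-- the stripped lines that are neither empty nor comments
def fpB_relevant (assembly_code : List String) : List String :=
  (assembly_code.map PySem.Str.strip).filter
    (fun l => !(l == "" || PySem.Str.startswith l ";"))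

-- does this (already relevant) line carry an instruction?
def fpB_isInstr (ln : String) : Bool :=
  if PySem.Str.isIn ":" ln then
    match PySem.Str.splitMax? ln ":" 1 with
    | some (_ :: rest :: _) => !(PySem.Str.strip rest == "")
    | _ => true   -- unreachable totality guard, as in A's port
  else true

-- address of line i of relevant: sum(1 for prev in relevant[:i] if is_instruction(prev))
-- (i comes from enumerate, hence i ≥ 0, so relevant[:i] is take)
def fpB_addr (rel : List String) (i : Int) : Int :=
  ((rel.take i.toNat).countP fpB_isInstr : Int)

-- the dict comprehension over enumerate(relevant), keyed by the lines containing ':'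
def fpB_dict (rel : List String) : PySem.Dict String Int :=
  (PySem.List.enumerate rel).foldl
    (fun t p =>
      if PySem.Str.isIn ":" p.2 then
        match PySem.Str.splitMax? p.2 ":" 1 with
        | some (label :: _ :: _) => t.insert (PySem.Str.strip label) (fpB_addr rel p.1)
        | _ => t   -- unreachable totality guard, as in A's port
      else t)
    PySem.Dict.empty

def first_pass_alt (assembly_code : List String) : List (String × Int) :=
  (fpB_dict (fpB_relevant assembly_code)).items

-- ===== PRECONDITION & SPEC =====
def Spec_first_pass (assembly_code : List String) (out : List (String × Int)) : Prop := out = first_pass_alt assembly_code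
instance (assembly_code : List String) (out : List (String × Int)) : Decidable (Spec_first_pass assembly_code out) := by unfold Spec_first_pass; infer_instance

-- ===== CLAIM (what is proved, stated in full; the proofs are below) =====
def Claim_equal_first_pass : Prop := ∀ (assembly_code : List String), Dom_first_pass assembly_code → Spec_first_pass assembly_code (first_pass assembly_code)

-- ===== LEMMAS AND PROOFS =====

-- A's loop body once stripping and the skip guard have been discharged (used only in proofs)
def fpA_body (st : PySem.Dict String Int × Int) (line : String) : PySem.Dict String Int × Int :=
  if PySem.Str.isIn ":" line then
    match PySem.Str.splitMax? line ":" 1 with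
    | some (label :: instruction :: _) =>
        let tbl := st.1.insert (PySem.Str.strip label) st.2
        let line := PySem.Str.strip instruction
        if line = "" then (tbl, st.2) else (tbl, st.2 + 1)
    | _ => if line = "" then st else (st.1, st.2 + 1)
  else if line = "" then st else (st.1, st.2 + 1)

-- fusion: A's fold over the raw lines is fpA_body folded over the relevant lines
theorem foldA_fused (code : List String) (init : PySem.Dict String Int × Int) :
    code.foldl fpA_step init = (fpB_relevant code).foldl fpA_body init := by
  unfold fpB_relevant
  rw [← PySem.List.foldl_if_eq_foldl_filter, List.foldl_map]
  apply PySem.List.foldl_congr_mem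
  intro st x _
  show fpA_step st x = _
  unfold fpA_step fpA_body
  generalize PySem.Str.strip x = l
  split_ifs <;> simp_all

-- elements of relevant are nonempty
theorem relevant_ne_empty (code : List String) : ∀ l ∈ fpB_relevant code, l ≠ "" := by
  intro l hl
  simp only [fpB_relevant, List.mem_filter] at hl
  intro h
  simp [h] at hl

-- main invariant: the fused fold computes B's dict together with the instruction count
theorem fold_body (rel : List String) (h : ∀ l ∈ rel, l ≠ "") :
    rel.foldl fpA_body (PySem.Dict.empty, 0) = (fpB_dict rel, (rel.countP fpB_isInstr : Int)) := by
  induction rel using List.reverseRecOn with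
  | nil => rfl
  | append_singleton rel ln ih =>
      have hrel : ∀ l ∈ rel, l ≠ "" := fun l hl => h l (List.mem_append_left _ hl)
      have hln : ln ≠ "" := h ln (List.mem_append_right _ (List.mem_singleton.mpr rfl))
      rw [List.foldl_append, ih hrel]
      have hlen : (((0 : Int) + (rel.length : Int))).toNat = rel.length := by omega
      have hdict : fpB_dict (rel ++ [ln]) =
          (fun t : PySem.Dict String Int =>
            if PySem.Str.isIn ":" ln then
              match PySem.Str.splitMax? ln ":" 1 with
              | some (label :: _ :: _) =>
                  t.insert (PySem.Str.strip label) ((rel.countP fpB_isInstr : Int))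
              | _ => t
            else t) (fpB_dict rel) := by
        unfold fpB_dict
        rw [PySem.List.enumerate_append, List.foldl_append]
        have hinner :
            List.foldl (fun t (p : Int × String) =>
                if PySem.Str.isIn ":" p.2 then
                  match PySem.Str.splitMax? p.2 ":" 1 with
                  | some (label :: _ :: _) =>
                      t.insert (PySem.Str.strip label) (fpB_addr (rel ++ [ln]) p.1)
                  | _ => t
                else t) PySem.Dict.empty (PySem.List.enumerate rel) =
            List.foldl (fun t (p : Int × String) =>
                if PySem.Str.isIn ":" p.2 then
                  match PySem.Str.splitMax? p.2 ":" 1 with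
                  | some (label :: _ :: _) =>
                      t.insert (PySem.Str.strip label) (fpB_addr rel p.1)
                  | _ => t
                else t) PySem.Dict.empty (PySem.List.enumerate rel) := by
          apply PySem.List.foldl_congr_mem
          intro acc p hp
          obtain ⟨k, hk, rfl⟩ := (PySem.List.mem_enumerate_iff _ _ _).mp hp
          have hk' : (((0 : Int) + (k : Int))).toNat ≤ rel.length := by omega
          have haddr : fpB_addr (rel ++ [ln]) ((0 : Int) + (k : Int)) =
              fpB_addr rel ((0 : Int) + (k : Int)) := by
            unfold fpB_addr
            rw [List.take_append_of_le_length hk']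
          rw [haddr]
        rw [hinner]
        have haddr2 : fpB_addr (rel ++ [ln]) ((0 : Int) + (rel.length : Int)) =
            (rel.countP fpB_isInstr : Int) := by
          unfold fpB_addr
          rw [hlen, List.take_append_of_le_length le_rfl, List.take_length]
        simp only [PySem.List.enumerate_cons, PySem.List.enumerate_nil, List.foldl_cons,
          List.foldl_nil, haddr2]
      have hcnt : (((rel ++ [ln]).countP fpB_isInstr : Nat) : Int) =
          (rel.countP fpB_isInstr : Int) + (if fpB_isInstr ln then 1 else 0) := by
        rw [List.countP_append]
        by_cases hi : fpB_isInstr ln = true <;> simp [hi]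
      simp only [List.foldl_cons, List.foldl_nil]
      rw [hdict, hcnt]
      unfold fpA_body fpB_isInstr
      by_cases hcol : PySem.Str.isIn ":" ln = true
      · simp only [hcol, if_true]
        cases hsp : PySem.Str.splitMax? ln ":" 1 with
        | none => simp [hln]
        | some parts =>
            match parts with
            | [] => simp [hln]
            | [label] => simp [hln]
            | label :: rest :: more =>
                by_cases hre : PySem.Str.strip rest = "" <;> simp [hre]
      · simp only [PySem.Str.isIn_eq, show (":").toList = [':'] from rfl] at hcol
        simp [hcol, hln]

-- ===== VERDICT (by name: the statement is the Claim_ definition above) =====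
theorem first_pass_spec : Claim_equal_first_pass := by
  intro code _
  show first_pass code = first_pass_alt code
  simp only [first_pass, first_pass_alt, foldA_fused,
    fold_body (fpB_relevant code) (relevant_ne_empty code)]
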